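-- pv_equiv track=rewrite | github.com/smcn0012/Algorithms | Burrows-Wheeler Transform/BWT.py | bwt_and_suffix_array_naive
-- ===== SOURCE A (Python) =====
-- def bwt_and_suffix_array_naive(text):
--     # This function naively gets the bwt and suffix array
--     bwt = [len(text)-1]
--     suffix_array = [len(text)]
--     sorted_sufixes = []
--     for i in range(len(text)):
--         sorted_sufixes.append(text[i:])
--     sorted_sufixes.sort()
--     for i in range(len(text)):
--         suffix_array.append(len(text) - len(sorted_sufixes[i]))
--         bwt.append(len(text) - len(sorted_sufixes[i]) - 1)
--     bwt[suffix_array.index(0)] = len(text)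
--     return bwt, suffix_array
-- ===== SOURCE B (Python) =====
-- def bwt_and_suffix_array_naive(text):
--     # Alternative: merge-sort the suffix START INDICES with a character-level
--     # comparator (no suffix slices are materialised), then derive both output
--     # arrays arithmetically, with no .index() search and no patching.
--     n = len(text)
--
--     def suffix_le(i, j):
--         # text[i:] <= text[j:] compared character by character
--         while i < n and j < n:
--             if text[i] != text[j]:
--                 return text[i] < text[j]
--             i += 1
--             j += 1
--         return i >= n
--
--     def merge(xs, ys):
--         out = []
--         a, b = 0, 0
--         while a < len(xs) and b < len(ys):
--             if suffix_le(xs[a], ys[b]):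
--                 out.append(xs[a])
--                 a += 1
--             else:
--                 out.append(ys[b])
--                 b += 1
--         out.extend(xs[a:])
--         out.extend(ys[b:])
--         return out
--
--     def msort(idx):
--         if len(idx) <= 1:
--             return idx
--         m = len(idx) // 2
--         return merge(msort(idx[:m]), msort(idx[m:]))
--
--     suffix_array = [n] + msort(list(range(n)))
--     bwt = [s - 1 if s > 0 else n for s in suffix_array]
--     return bwt, suffix_array
-- ===== Notes on version B (the rewrite author's own statement) =====
-- stated objective: alternative
-- what changed: B merge-sorts the suffix start indices with a character-level comparator instead of materialising and sorting all suffix slices, and derives both output arrays arithmetically from the suffix array instead of A's second loop plus .index(0) patch.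
import Mathlib
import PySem

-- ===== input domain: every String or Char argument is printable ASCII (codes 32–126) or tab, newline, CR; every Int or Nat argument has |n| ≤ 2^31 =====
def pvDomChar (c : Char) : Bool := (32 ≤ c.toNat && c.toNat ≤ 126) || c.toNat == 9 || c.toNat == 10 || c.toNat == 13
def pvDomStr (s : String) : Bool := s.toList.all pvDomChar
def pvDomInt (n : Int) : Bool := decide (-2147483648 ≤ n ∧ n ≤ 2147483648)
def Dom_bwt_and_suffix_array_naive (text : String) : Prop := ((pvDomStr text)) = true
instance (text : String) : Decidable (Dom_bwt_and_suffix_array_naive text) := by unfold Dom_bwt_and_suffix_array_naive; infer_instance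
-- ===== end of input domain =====

-- B replaces A's "materialise every suffix slice, sort the strings, recover indices
-- from lengths and patch via .index(0)" with a merge sort of the suffix START INDICES
-- under a character-level comparator, deriving both arrays arithmetically
-- (objective: alternative — a structurally different algorithm, not claimed faster).

-- ===== PORT A =====
def bwt_and_suffix_array_naive (text : String) : List Int × List Int :=
  let n : Int := PySem.Str.len text
  let bwt : List Int := [n - 1]
  let suffix_array : List Int := [n]
  let sorted_sufixes : List String :=
    (PySem.List.pyRange 0 n 1).foldl
      (fun acc i => acc ++ [PySem.Str.slice text (some i) none]) []
  let sorted_sufixes := PySem.List.sorted sorted_sufixes (fun s => s) false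
  let st :=
    (PySem.List.pyRange 0 n 1).foldl
      (fun (st : List Int × List Int) i =>
        (st.1 ++ [n - PySem.Str.len (PySem.List.pyGetD sorted_sufixes i "") - 1],
         st.2 ++ [n - PySem.Str.len (PySem.List.pyGetD sorted_sufixes i "")]))
      (bwt, suffix_array)
  let bwt := st.1
  let suffix_array := st.2
  -- bwt[suffix_array.index(0)] = len(text); index always succeeds (0 is present)
  let bwt := match PySem.List.index? suffix_array 0 with
    | some k => bwt.set k n
    | none => bwt
  (bwt, suffix_array)

-- ===== PORT B =====
-- text[i:] <= text[j:], compared character by character (Source B's suffix_le)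
def pvSufLe (t : List Char) (i j : Nat) : Bool :=
  if h : i < t.length ∧ j < t.length then
    if t[i]'h.1 ≠ t[j]'h.2 then decide (t[i]'h.1 < t[j]'h.2)
    else pvSufLe t (i + 1) (j + 1)
  else decide (t.length ≤ i)
termination_by t.length - i
decreasing_by omega

-- Source B's merge
def pvMerge (t : List Char) : List Nat → List Nat → List Nat
  | [], ys => ys
  | x :: xs, [] => x :: xs
  | x :: xs, y :: ys =>
      if pvSufLe t x y then x :: pvMerge t xs (y :: ys)
      else y :: pvMerge t (x :: xs) ys

-- Source B's msort
def pvMsort (t : List Char) (idx : List Nat) : List Nat :=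
  if idx.length ≤ 1 then idx
  else
    let m := idx.length / 2
    pvMerge t (pvMsort t (idx.take m)) (pvMsort t (idx.drop m))
termination_by idx.length
decreasing_by
  · simp; omega
  · simp; omega

def bwt_and_suffix_array_naive_alt (text : String) : List Int × List Int :=
  let t := text.toList
  let n := t.length
  let sa : List Nat := n :: pvMsort t (List.range n)
  let suffix_array : List Int := List.map (fun s : Nat => (s : Int)) sa
  let bwt : List Int := List.map (fun s : Nat => if 0 < s then (s : Int) - 1 else (n : Int)) sa
  (bwt, suffix_array)

-- ===== PRECONDITION & SPEC =====
def Spec_bwt_and_suffix_array_naive (text : String) (out : List Int × List Int) : Prop := out = bwt_and_suffix_array_naive_alt text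
instance (text : String) (out : List Int × List Int) : Decidable (Spec_bwt_and_suffix_array_naive text out) := by unfold Spec_bwt_and_suffix_array_naive; infer_instance

-- ===== CLAIM (what is proved, stated in full; the proofs are below) =====
def Claim_equal_bwt_and_suffix_array_naive : Prop := ∀ (text : String), Dom_bwt_and_suffix_array_naive text → Spec_bwt_and_suffix_array_naive text (bwt_and_suffix_array_naive text)

-- ===== LEMMAS AND PROOFS =====

-- A character-list comparison splits on the head (List Char is ordered lexicographically)
theorem cons_le_cons_iff_char (a b : Char) (l m : List Char) :
    (a :: l : List Char) ≤ (b :: m) ↔ (a < b ∨ (a = b ∧ l ≤ m)) := by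
  constructor
  · intro h
    rw [← not_lt] at h
    replace h : ¬ List.Lex (· < ·) (b :: m) (a :: l) := h
    rw [List.cons_lex_cons_iff] at h
    push Not at h
    rcases lt_trichotomy a b with h1|h1|h1
    · exact Or.inl h1
    · subst h1
      refine Or.inr ⟨rfl, ?_⟩
      rw [← not_lt]
      exact h.2 rfl
    · exact absurd h.1 (not_le.mpr h1)
  · intro h
    rw [← not_lt]
    intro hlt
    replace hlt : List.Lex (· < ·) (b :: m) (a :: l) := hlt
    rw [List.cons_lex_cons_iff] at hlt
    rcases h with h1|⟨rfl,h1⟩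
    · rcases hlt with h2|⟨h2,_⟩
      · exact absurd h1 (asymm h2)
      · exact absurd h1 (h2 ▸ lt_irrefl _)
    · rcases hlt with h2|⟨-,h2⟩
      · exact lt_irrefl _ h2
      · rw [← not_lt] at h1; exact h1 h2

theorem nil_le_char (l : List Char) : ([] : List Char) ≤ l := by
  rw [← not_lt]
  exact List.not_lex_nil

theorem not_cons_le_nil_char (a : Char) (l : List Char) : ¬ ((a :: l : List Char) ≤ []) := by
  rw [← not_lt, not_not]
  exact List.Lex.nil

-- pvSufLe decides the lexicographic order of the two suffixes
theorem pvSufLe_iff (t : List Char) (i j : Nat) :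
    pvSufLe t i j = true ↔ t.drop i ≤ t.drop j := by
  induction i, j using pvSufLe.induct t with
  | case1 i j h hne =>
    rw [pvSufLe]
    simp only [h, hne, if_pos, ne_eq, not_false_iff]
    rw [List.drop_eq_getElem_cons h.1, List.drop_eq_getElem_cons h.2,
      cons_le_cons_iff_char]
    simp [hne]
  | case2 i j h heq ih =>
    rw [pvSufLe]
    simp only [h, heq, if_neg, not_false_eq_true]
    rw [List.drop_eq_getElem_cons h.1, List.drop_eq_getElem_cons h.2,
      cons_le_cons_iff_char]
    simp only [not_not] at heq
    simp [heq, ih]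
  | case3 i j h =>
    rw [pvSufLe]
    rw [dif_neg h]
    push Not at h
    by_cases hi : t.length ≤ i
    · simp [hi, List.drop_eq_nil_of_le hi, nil_le_char]
    · have hj : t.length ≤ j := h (by omega)
      rw [List.drop_eq_nil_of_le hj]
      have hlt : i < t.length := by omega
      simp only [decide_eq_true_eq]
      rw [List.drop_eq_getElem_cons hlt]
      simp only [hi, false_iff]
      exact not_cons_le_nil_char _ _

-- merge: permutation and sortedness
theorem pvMerge_perm (t : List Char) (xs ys : List Nat) :
    (pvMerge t xs ys).Perm (xs ++ ys) := by
  induction xs, ys using pvMerge.induct t with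
  | case1 ys => simp [pvMerge]
  | case2 x xs => simp [pvMerge]
  | case3 x xs y ys hle ih =>
    rw [pvMerge, if_pos hle]
    exact (ih.cons x).trans (by simp)
  | case4 x xs y ys hle ih =>
    rw [pvMerge, if_neg hle]
    exact (ih.cons y).trans List.perm_middle.symm

theorem pvMerge_pairwise (t : List Char) (xs ys : List Nat)
    (hx : xs.Pairwise (fun a b => t.drop a ≤ t.drop b))
    (hy : ys.Pairwise (fun a b => t.drop a ≤ t.drop b)) :
    (pvMerge t xs ys).Pairwise (fun a b => t.drop a ≤ t.drop b) := by
  induction xs, ys using pvMerge.induct t with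
  | case1 ys => simpa [pvMerge] using hy
  | case2 x xs => simpa [pvMerge] using hx
  | case3 x xs y ys hle ih =>
    rw [pvMerge, if_pos hle]
    rw [pvSufLe_iff] at hle
    rw [List.pairwise_cons] at hx ⊢
    refine ⟨?_, ih hx.2 hy⟩
    intro z hz
    have hz' : z ∈ xs ++ y :: ys := (pvMerge_perm t xs (y :: ys)).mem_iff.mp hz
    rcases List.mem_append.mp hz' with h | h
    · exact hx.1 z h
    · rcases List.mem_cons.mp h with rfl | h
      · exact hle
      · rw [List.pairwise_cons] at hy
        exact le_trans hle (hy.1 z h)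
  | case4 x xs y ys hle ih =>
    rw [pvMerge, if_neg hle]
    have hyx : t.drop y ≤ t.drop x := by
      have := (pvSufLe_iff t x y).not.mp (by simp [hle])
      exact le_of_not_ge (by simpa using this)
    rw [List.pairwise_cons] at hy ⊢
    refine ⟨?_, ih hx hy.2⟩
    intro z hz
    have hz' : z ∈ x :: xs ++ ys := (pvMerge_perm t (x :: xs) ys).mem_iff.mp hz
    rcases List.mem_append.mp hz' with h | h
    · rcases List.mem_cons.mp h with rfl | h
      · exact hyx
      · rw [List.pairwise_cons] at hx
        exact le_trans hyx (hx.1 z h)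
    · exact hy.1 z h

theorem pvMsort_perm (t : List Char) (idx : List Nat) :
    (pvMsort t idx).Perm idx := by
  induction idx using pvMsort.induct with
  | case1 idx h => rw [pvMsort, if_pos h]
  | case2 idx h m ih1 ih2 =>
    rw [pvMsort, if_neg h]
    refine (pvMerge_perm t _ _).trans ?_
    refine ((ih1.append ih2).trans ?_)
    simp

theorem pvMsort_pairwise (t : List Char) (idx : List Nat) :
    (pvMsort t idx).Pairwise (fun a b => t.drop a ≤ t.drop b) := by
  induction idx using pvMsort.induct with
  | case1 idx h =>
    rw [pvMsort, if_pos h]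
    match idx, h with
    | [], _ => simp
    | [x], _ => simp
    | x :: y :: l, h => simp at h
  | case2 idx h m ih1 ih2 =>
    rw [pvMsort, if_neg h]
    exact pvMerge_pairwise t _ _ ih1 ih2

-- A's second loop appends one element to each component per step
theorem foldl_pair_append (S : List String) (f g : String → Int) (a b : List Int) :
    S.foldl (fun st s => (st.1 ++ [f s], st.2 ++ [g s])) (a, b) = (a ++ S.map f, b ++ S.map g) := by
  induction S generalizing a b with
  | nil => simp
  | cons s S ih => simp [List.foldl_cons, ih]

-- A's ".index(0) then patch" on the tail equals B's arithmetic map (Nodup tail)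
theorem patch_map (N : Int) (L : List Nat) (k : Nat) (hnd : L.Nodup)
    (hidx : PySem.List.index? (L.map (fun i : Nat => (i:Int))) 0 = some k) :
    (L.map (fun i : Nat => (i:Int) - 1)).set k N
      = L.map (fun s : Nat => if 0 < s then (s:Int) - 1 else N) := by
  induction L generalizing k with
  | nil => simp [PySem.List.index?] at hidx
  | cons x L ih =>
    rw [List.nodup_cons] at hnd
    by_cases hx : x = 0
    · subst hx
      rw [List.map_cons, show ((0:Nat):Int) = 0 by simp,
        PySem.List.index?_cons_self] at hidx
      obtain rfl : (0:Nat) = k := Option.some.inj hidx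
      rw [List.map_cons, List.map_cons, List.set_cons_zero, if_neg (lt_irrefl 0)]
      congr 1
      refine List.map_congr_left ?_
      intro s hs
      have hs0 : s ≠ 0 := fun h => hnd.1 (h ▸ hs)
      rw [if_pos (Nat.pos_of_ne_zero hs0)]
    · have hxi : ((x:Nat):Int) ≠ 0 := by exact_mod_cast hx
      rw [List.map_cons, PySem.List.index?_cons_of_ne _ hxi] at hidx
      rcases Option.map_eq_some_iff.mp hidx with ⟨k', hk', rfl⟩
      simp only [List.map_cons, List.set_cons_succ]
      rw [ih k' hnd.2 hk']
      congr 1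
      rw [if_pos (Nat.pos_of_ne_zero hx)]

-- characterization of A's sorted-suffix pass: mapping each sorted suffix to its start
-- index yields exactly B's merge-sorted index list
theorem sorted_suffix_char (text : String) :
    (PySem.List.sorted
        ((List.range text.toList.length).map
          (fun i : Nat => PySem.Str.slice text (some (i:Int)) none))
        (fun s => s) false).map
      (fun s => text.toList.length - s.toList.length)
      = pvMsort text.toList (List.range text.toList.length) := by
  set tl := text.toList with htl
  set n := tl.length with hn
  set gN : String → Nat := fun s => n - s.toList.length with hgN
  set sl : Nat → String := fun i => PySem.Str.slice text (some (i:Int)) none with hsl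
  have hslice : ∀ i : Nat, (sl i).toList = tl.drop i := by
    intro i
    simp [hsl, PySem.Str.toList_slice, PySem.List.slice_from_natCast, htl]
  have hgsl : ∀ i ∈ List.range n, gN (sl i) = i := by
    intro i hi
    rw [List.mem_range] at hi
    simp only [hgN, hslice i, List.length_drop]
    omega
  have hSperm : (PySem.List.sorted ((List.range n).map sl) (fun s => s) false).Perm
      ((List.range n).map sl) := PySem.List.sorted_perm _ _ _
  set S := PySem.List.sorted ((List.range n).map sl) (fun s => s) false with hS
  have hSle : S.Pairwise (fun a b => a ≤ b) := by
    have := PySem.List.sorted_pairwise (xs := (List.range n).map sl) (key := fun s : String => s)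
    exact this
  have hnodup_sl : ((List.range n).map sl).Nodup := by
    refine List.Nodup.map_on ?_ (List.nodup_range)
    intro i hi j hj hfe
    rw [List.mem_range] at hi hj
    have : tl.drop i = tl.drop j := by rw [← hslice i, ← hslice j, hfe]
    have := congrArg List.length this
    simp only [List.length_drop] at this
    omega
  have hSnodup : S.Nodup := (hSperm.nodup_iff).mpr hnodup_sl
  have hchar : ∀ s ∈ S, s.toList = tl.drop (gN s) ∧ gN s < n ∨ (s.toList = [] ∧ n = 0) := by
    intro s hs
    have hs' : s ∈ (List.range n).map sl := hSperm.mem_iff.mp hs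
    rcases List.mem_map.mp hs' with ⟨i, hi, rfl⟩
    rw [List.mem_range] at hi
    left
    constructor
    · rw [hslice i]
      congr 1
      rw [hgN]
      simp only [hslice i, List.length_drop]
      omega
    · rw [hgN]
      simp only [hslice i, List.length_drop]
      omega
  have hcharS : ∀ s ∈ S, s.toList = tl.drop (gN s) := by
    intro s hs
    rcases hchar s hs with ⟨h, _⟩ | ⟨h1, h2⟩
    · exact h
    · rw [h1, List.drop_eq_nil_of_le]
      omega
  have h1 : (S.map gN).Perm (List.range n) := by
    refine (hSperm.map gN).trans ?_
    rw [List.map_map]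
    have : (List.range n).map (gN ∘ sl) = (List.range n).map id :=
      List.map_congr_left (fun i hi => hgsl i hi)
    rw [this, List.map_id]
  have h2 : (S.map gN).Pairwise (fun a b => tl.drop a < tl.drop b) := by
    rw [List.pairwise_map]
    refine List.Pairwise.imp_of_mem ?_ (hSle.and hSnodup)
    intro a b ha hb hab
    have halt : a < b := lt_of_le_of_ne hab.1 hab.2
    rw [← hcharS a ha, ← hcharS b hb]
    exact String.lt_iff_toList_lt.mp halt
  have hLperm : (pvMsort tl (List.range n)).Perm (List.range n) := pvMsort_perm tl _
  have hLnodup : (pvMsort tl (List.range n)).Nodup := (hLperm.nodup_iff).mpr (List.nodup_range)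
  have h4 : (pvMsort tl (List.range n)).Pairwise (fun a b => tl.drop a < tl.drop b) := by
    refine List.Pairwise.imp_of_mem ?_ ((pvMsort_pairwise tl _).and hLnodup)
    intro a b ha hb hab
    have ha' : a < n := List.mem_range.mp (hLperm.mem_iff.mp ha)
    have hb' : b < n := List.mem_range.mp (hLperm.mem_iff.mp hb)
    refine lt_of_le_of_ne hab.1 ?_
    intro he
    have := congrArg List.length he
    simp only [List.length_drop] at this
    exact hab.2 (by omega)
  exact (PySem.List.sorted_eq_of_perm_of_pairwise_lt (List.range n) (S.map gN)
      (fun i => tl.drop i) h1 h2).symm.trans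
    (PySem.List.sorted_eq_of_perm_of_pairwise_lt (List.range n) _
      (fun i => tl.drop i) hLperm h4)

theorem foldA (S : List String) (nI : Int) (a b : List Int) :
    (PySem.List.pyRange 0 (S.length:Int) 1).foldl
      (fun (st : List Int × List Int) i =>
        (st.1 ++ [nI - PySem.Str.len (PySem.List.pyGetD S i "") - 1],
         st.2 ++ [nI - PySem.Str.len (PySem.List.pyGetD S i "")])) (a, b)
      = (a ++ S.map (fun s => nI - PySem.Str.len s - 1),
         b ++ S.map (fun s => nI - PySem.Str.len s)) := by
  rw [PySem.List.foldl_pyRange_zero_pyGetD' S ""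
    (fun (st : List Int × List Int) s => (st.1 ++ [nI - PySem.Str.len s - 1], st.2 ++ [nI - PySem.Str.len s])) (a, b)]
  exact foldl_pair_append S _ _ a b

theorem foldB (S : List String) (n : Nat) (h : S.length = n) (nI : Int) (a b : List Int) :
    ((List.range n).map (fun k : Nat => (k:Int))).foldl
      (fun (st : List Int × List Int) i =>
        (st.1 ++ [nI - PySem.Str.len (PySem.List.pyGetD S i "") - 1],
         st.2 ++ [nI - PySem.Str.len (PySem.List.pyGetD S i "")])) (a, b)
      = (a ++ S.map (fun s => nI - PySem.Str.len s - 1),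
         b ++ S.map (fun s => nI - PySem.Str.len s)) := by
  subst h
  rw [← PySem.List.pyRange_zero_natCast]
  exact foldA S nI a b

theorem main_eq (text : String) :
    bwt_and_suffix_array_naive text = bwt_and_suffix_array_naive_alt text := by
  rw [bwt_and_suffix_array_naive, bwt_and_suffix_array_naive_alt]
  have e1 : PySem.Str.len text = ((text.toList.length : Nat) : Int) := by simp
  rw [e1, PySem.List.pyRange_zero_natCast]
  rw [show (List.foldl (fun acc i => acc ++ [PySem.Str.slice text (some i) none]) []
      ((List.range text.toList.length).map (fun k : Nat => (k:Int))))
    = ((List.range text.toList.length).map (fun k : Nat => (k:Int))).map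
        (fun i => PySem.Str.slice text (some i) none) from by
      simpa using PySem.List.foldl_append_singleton_eq_map
        (fun i => PySem.Str.slice text (some i) none)
        ((List.range text.toList.length).map (fun k : Nat => (k:Int))) []]
  rw [List.map_map]
  simp only [Function.comp_def]
  set tl := text.toList with htl
  set n := tl.length with hn
  set S := PySem.List.sorted
      ((List.range n).map (fun i : Nat => PySem.Str.slice text (some (i:Int)) none))
      (fun s => s) false with hS
  have hlen : S.length = n := by
    rw [hS, PySem.List.length_sorted, List.length_map, List.length_range]
  rw [foldB S n hlen]
  dsimp only
  have hc := sorted_suffix_char text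
  rw [← htl, ← hn, ← hS] at hc
  have hmem_len : ∀ s ∈ S, s.toList.length ≤ n := by
    intro s hs
    have hs' := (PySem.List.sorted_perm _ _ _ : S.Perm _).mem_iff.mp hs
    rcases List.mem_map.mp hs' with ⟨i, hi, rfl⟩
    have : (PySem.Str.slice text (some (i:Int)) none).toList = tl.drop i := by
      simp [PySem.Str.toList_slice, PySem.List.slice_from_natCast, htl]
    rw [this, List.length_drop]
    omega
  have hlenS : ∀ s ∈ S, PySem.Str.len s = ((s.toList.length : Nat) : Int) := by
    intro s _; simp
  have hmapg : List.map (fun s => (n:Int) - PySem.Str.len s) S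
      = List.map (fun k : Nat => (k:Int)) (pvMsort tl (List.range n)) := by
    rw [← hc, List.map_map]
    refine List.map_congr_left ?_
    intro s hs
    have h1 := hmem_len s hs
    simp only [Function.comp_def, hlenS s hs]
    push_cast [Nat.cast_sub h1]
    ring
  have hmapf : List.map (fun s => (n:Int) - PySem.Str.len s - 1) S
      = List.map (fun k : Nat => (k:Int) - 1) (pvMsort tl (List.range n)) := by
    rw [← hc, List.map_map]
    refine List.map_congr_left ?_
    intro s hs
    have h1 := hmem_len s hs
    simp only [Function.comp_def, hlenS s hs]
    push_cast [Nat.cast_sub h1]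
    ring
  rw [hmapg, hmapf]
  simp only [List.singleton_append, List.map_cons]
  have hLperm := pvMsort_perm tl (List.range n)
  have hLnodup : (pvMsort tl (List.range n)).Nodup := (hLperm.nodup_iff).mpr (List.nodup_range)
  by_cases hn0 : n = 0
  · rw [hn0]
    have hL0 : pvMsort tl (List.range 0) = [] := by rw [pvMsort]; simp
    rw [hL0]
    simp
  · have hpos : 0 < n := Nat.pos_of_ne_zero hn0
    have hnz : ((n:Nat):Int) ≠ 0 := by exact_mod_cast hn0
    rw [PySem.List.index?_cons_of_ne _ hnz]
    have h0mem : (0:Int) ∈ List.map (fun k : Nat => (k:Int)) (pvMsort tl (List.range n)) :=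
      List.mem_map.mpr ⟨0, hLperm.mem_iff.mpr (List.mem_range.mpr hpos), rfl⟩
    obtain ⟨k, hk⟩ := Option.isSome_iff_exists.mp
      ((PySem.List.index?_isSome_iff _ _).mpr h0mem)
    rw [hk]
    simp only [Option.map_some]
    rw [if_pos hpos]
    refine Prod.ext ?_ rfl
    dsimp only
    rw [List.set_cons_succ, patch_map (↑n) (pvMsort tl (List.range n)) k hLnodup hk]
-- ===== VERDICT (by name: the statement is the Claim_ definition above) =====
theorem bwt_and_suffix_array_naive_spec : Claim_equal_bwt_and_suffix_array_naive := by
  intro text _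
  unfold Spec_bwt_and_suffix_array_naive
  exact main_eq text
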